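-- pv_equiv track=rewrite | github.com/ja153903/binary_search | binary_search/easy/group_integers.py | solve
-- ===== SOURCE A (Python) =====
-- import collections
-- from typing import List
--
-- def solve(nums: List[int]) -> bool:
--     if len(nums) < 2:
--         return False
--
--     counter = collections.Counter(nums)
--
--     # if there is only one group, then we return True
--     if len(counter) == 1:
--         return True
--
--     # all groups have to have an even number or all the same count
--     same_count = True
--     prev = None
--     for _, value in counter.items():
--         if prev is None:
--             prev = value
--
--         if prev is not None and value != prev:
--             same_count = False
--             break
--         elif prev is not None:
--             prev = value
--
--     if same_count and prev >= 2:
--         return True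
--
--     for _, value in counter.items():
--         if value < 2 or value % 2 == 1:
--             return False
--
--     return True
-- ===== SOURCE B (Python) =====
-- from typing import List
--
-- def solve(nums: List[int]) -> bool:
--     if len(nums) < 2:
--         return False
--     s = sorted(nums)
--     counts = []
--     cur, run = s[0], 1
--     for y in s[1:]:
--         if y == cur:
--             run += 1
--         else:
--             counts.append(run)
--             cur, run = y, 1
--     counts.append(run)
--     if min(counts) == max(counts):
--         return counts[0] >= 2
--     return all(c >= 2 and c % 2 == 0 for c in counts)
-- ===== Notes on version B (the rewrite author's own statement) =====
-- stated objective: idiomatic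
-- what changed: Replaces the Counter hash-count plus two separate passes over counter.items() by a sort + run-length sweep over the sorted list, deciding the all-equal case with min==max and the rest with one all() check.
import Mathlib
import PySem

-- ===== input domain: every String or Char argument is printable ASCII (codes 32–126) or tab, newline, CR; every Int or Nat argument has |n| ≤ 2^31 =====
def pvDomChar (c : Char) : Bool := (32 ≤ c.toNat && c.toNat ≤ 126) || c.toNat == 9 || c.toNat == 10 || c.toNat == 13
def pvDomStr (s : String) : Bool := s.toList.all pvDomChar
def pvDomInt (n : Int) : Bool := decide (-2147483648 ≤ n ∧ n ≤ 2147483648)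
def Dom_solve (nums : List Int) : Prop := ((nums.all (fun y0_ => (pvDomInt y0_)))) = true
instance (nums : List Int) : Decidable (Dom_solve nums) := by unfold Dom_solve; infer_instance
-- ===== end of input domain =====

-- B replaces A's Counter plus two separate passes over counter.items() by a sort + run-length
-- sweep, deciding the all-equal case with min==max (objective: more idiomatic, no hash counting).

-- ===== PORT A =====
-- the `for _, value in counter.items()` scan computing (same_count, prev), with its break
def pvSameLoop : List (Int × Int) → Option Int → Bool × Option Int
  | [], prev => (true, prev)
  | p :: rest, prev =>
      let prev := if prev.isNone then some p.2 else prev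
      if prev.isSome && (some p.2 != prev) then (false, prev)
      else pvSameLoop rest (if prev.isSome then some p.2 else prev)

-- the second loop: `return False` on a count < 2 or odd, else fall through to True
def pvEvenLoop : List (Int × Int) → Bool
  | [] => true
  | p :: rest => if p.2 < 2 || (PySem.Int.mod p.2 2 == 1) then false else pvEvenLoop rest

def solve (nums : List Int) : Bool :=
  if nums.length < 2 then false
  else
    let counter := PySem.Dict.counter nums
    if counter.size == 1 then true
    else
      let sp := pvSameLoop counter.items none
      -- `prev >= 2`: counter is nonempty here, so prev is `some _`; `.getD 0` only names the unreachable none case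
      if sp.1 && decide (2 ≤ sp.2.getD 0) then true
      else pvEvenLoop counter.items

-- ===== PORT B =====
-- run-length sweep over the sorted list (cur, run accumulator; emits run at each change and at the end)
def pvRuns : List Int → Int → Int → List Int
  | [], _, run => [run]
  | y :: ys, cur, run => if y == cur then pvRuns ys cur (run + 1) else run :: pvRuns ys y 1

def solve_alt (nums : List Int) : Bool :=
  if nums.length < 2 then false
  else
    match PySem.List.sorted nums (fun v => v) false with
    | [] => false  -- unreachable: nums is nonempty
    | x :: xs =>
      match pvRuns xs x 1 with
      | [] => false  -- unreachable: pvRuns is never empty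
      | c :: cs =>
        if PySem.List.min? (c :: cs) (fun v => v) == PySem.List.max? (c :: cs) (fun v => v)
        then decide (2 ≤ c)
        else (c :: cs).all (fun v => decide (2 ≤ v) && (PySem.Int.mod v 2 == 0))

-- ===== PRECONDITION & SPEC =====
def Spec_solve (nums : List Int) (out : Bool) : Prop := out = solve_alt nums
instance (nums : List Int) (out : Bool) : Decidable (Spec_solve nums out) := by unfold Spec_solve; infer_instance

-- ===== CLAIM (what is proved, stated in full; the proofs are below) =====
def Claim_equal_solve : Prop := ∀ (nums : List Int), Dom_solve nums → Spec_solve nums (solve nums)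

-- ===== LEMMAS AND PROOFS =====

-- the common characterisation: every value's count is one common k ≥ 2, or all counts are even and ≥ 2
def pvGood (nums : List Int) : Prop :=
  (∃ k : Int, 2 ≤ k ∧ ∀ x ∈ nums, (nums.count x : Int) = k) ∨
  (∀ x ∈ nums, 2 ≤ (nums.count x : Int) ∧ PySem.Int.mod (nums.count x) 2 = 0)

theorem pvSameLoop_some (l : List (Int × Int)) (a : Int) :
    pvSameLoop l (some a) = (decide (∀ p ∈ l, p.2 = a), some a) := by
  induction l with
  | nil => simp [pvSameLoop]
  | cons p rest ih =>
    by_cases hp : p.2 = a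
    · simp [pvSameLoop, hp, ih]
    · simp [pvSameLoop, hp]

theorem pvEvenLoop_iff (l : List (Int × Int)) :
    pvEvenLoop l = true ↔ ∀ p ∈ l, 2 ≤ p.2 ∧ PySem.Int.mod p.2 2 ≠ 1 := by
  induction l with
  | nil => simp [pvEvenLoop]
  | cons p rest ih =>
    by_cases hb : (decide (p.2 < 2) || (PySem.Int.mod p.2 2 == 1)) = true
    · rw [show pvEvenLoop (p :: rest) = false from by rw [pvEvenLoop, if_pos hb]]
      simp only [Bool.or_eq_true, decide_eq_true_eq, beq_iff_eq] at hb
      simp only [Bool.false_eq_true, false_iff, not_forall]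
      refine ⟨p, List.mem_cons_self .., ?_⟩
      rintro ⟨h1, h2⟩
      rcases hb with hb | hb
      · omega
      · exact h2 hb
    · rw [show pvEvenLoop (p :: rest) = pvEvenLoop rest from by rw [pvEvenLoop, if_neg hb]]
      simp only [Bool.or_eq_true, decide_eq_true_eq, beq_iff_eq, not_or] at hb
      rw [ih]
      constructor
      · intro h q hq
        rcases List.mem_cons.mp hq with rfl | hq'
        · exact ⟨by omega, hb.2⟩
        · exact h q hq'
      · intro h q hq
        exact h q (List.mem_cons_of_mem _ hq)

theorem pvMod2 (v : Int) : PySem.Int.mod v 2 ≠ 1 ↔ PySem.Int.mod v 2 = 0 := by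
  have h1 := PySem.Int.mod_nonneg v (b := 2) (by omega)
  have h2 := PySem.Int.mod_lt v (b := 2) (by omega)
  omega

theorem pvRuns_ne_nil (xs : List Int) (x run : Int) : pvRuns xs x run ≠ [] := by
  cases xs with
  | nil => simp [pvRuns]
  | cons y ys =>
    by_cases hy : y = x
    · simpa [pvRuns, hy] using pvRuns_ne_nil ys x (run + 1)
    · simp [pvRuns, hy]

theorem pvRuns_mem (xs : List Int) (x run r : Int) (h : (x :: xs).Pairwise (· ≤ ·)) :
    r ∈ pvRuns xs x run ↔
      r = run + (xs.count x : Int) ∨ ∃ z ∈ xs, z ≠ x ∧ (xs.count z : Int) = r := by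
  induction xs generalizing x run with
  | nil => simp [pvRuns]
  | cons y ys ih =>
    rcases List.pairwise_cons.mp h with ⟨hx, hyy⟩
    rcases List.pairwise_cons.mp hyy with ⟨hy, hys⟩
    by_cases hyx : y = x
    · subst hyx
      have hpair : (y :: ys).Pairwise (· ≤ ·) :=
        List.pairwise_cons.mpr ⟨fun a ha => hx a (List.mem_cons_of_mem _ ha), hys⟩
      rw [show pvRuns (y :: ys) y run = pvRuns ys y (run + 1) from by simp [pvRuns]]
      rw [ih y (run + 1) hpair]
      constructor
      · rintro (h1 | ⟨z, hz, hzy, hzc⟩)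
        · left; rw [List.count_cons_self]; push_cast; omega
        · right
          exact ⟨z, List.mem_cons_of_mem _ hz, hzy, by rw [List.count_cons_of_ne (Ne.symm hzy)]; exact hzc⟩
      · rintro (h1 | ⟨z, hz, hzy, hzc⟩)
        · left; rw [List.count_cons_self] at h1; push_cast at h1 ⊢; omega
        · rcases List.mem_cons.mp hz with rfl | hz'
          · exact absurd rfl hzy
          · right
            exact ⟨z, hz', hzy, by rw [List.count_cons_of_ne (Ne.symm hzy)] at hzc; exact hzc⟩
    · have hxy : x ≤ y := hx y (List.mem_cons_self ..)
      have hxnot : x ∉ ys := fun hmem => hyx (le_antisymm (hy x hmem) hxy)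
      have hcount0 : (y :: ys).count x = 0 := by
        rw [List.count_eq_zero]
        intro hmem
        rcases List.mem_cons.mp hmem with h' | h'
        · exact hyx h'.symm
        · exact hxnot h'
      rw [show pvRuns (y :: ys) x run = run :: pvRuns ys y 1 from by simp [pvRuns, hyx]]
      rw [List.mem_cons, ih y 1 hyy]
      constructor
      · rintro (rfl | h1 | ⟨z, hz, hzy, hzc⟩)
        · left; rw [hcount0]; simp
        · right
          refine ⟨y, List.mem_cons_self .., fun h' => hyx h', ?_⟩
          rw [List.count_cons_self]; push_cast; omega
        · right
          refine ⟨z, List.mem_cons_of_mem _ hz, fun h' => hxnot (h' ▸ hz), ?_⟩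
          rw [List.count_cons_of_ne (Ne.symm hzy)]; exact hzc
      · rintro (h1 | ⟨z, hz, hzx, hzc⟩)
        · left; rw [hcount0] at h1; simpa using h1
        · by_cases hzy : z = y
          · subst hzy
            right; left
            rw [List.count_cons_self] at hzc; push_cast at hzc ⊢; omega
          · rcases List.mem_cons.mp hz with rfl | hz'
            · exact absurd rfl hzy
            · right; right
              exact ⟨z, hz', hzy, by rw [List.count_cons_of_ne (Ne.symm hzy)] at hzc; exact hzc⟩

theorem pvRuns_mem' (xs : List Int) (x r : Int) (h : (x :: xs).Pairwise (· ≤ ·)) :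
    r ∈ pvRuns xs x 1 ↔ ∃ z ∈ (x :: xs), (((x :: xs).count z : Int)) = r := by
  rw [pvRuns_mem xs x 1 r h]
  constructor
  · rintro (h1 | ⟨z, hz, hzx, hzc⟩)
    · refine ⟨x, List.mem_cons_self .., ?_⟩
      rw [List.count_cons_self]; push_cast; omega
    · refine ⟨z, List.mem_cons_of_mem _ hz, ?_⟩
      rw [List.count_cons_of_ne (Ne.symm hzx)]; exact hzc
  · rintro ⟨z, hz, hzc⟩
    by_cases hzx : z = x
    · subst hzx
      left; rw [List.count_cons_self] at hzc; push_cast at hzc ⊢; omega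
    · rcases List.mem_cons.mp hz with rfl | hz'
      · exact absurd rfl hzx
      · right
        exact ⟨z, hz', hzx, by rw [List.count_cons_of_ne (Ne.symm hzx)] at hzc; exact hzc⟩

theorem solve_iff (nums : List Int) (h2 : 2 ≤ nums.length) :
    solve nums = true ↔ pvGood nums := by
  have hlt : ¬ nums.length < 2 := by omega
  have hne : nums ≠ [] := by intro h0; rw [h0] at h2; simp at h2
  obtain ⟨n0, ntl, hn⟩ := List.exists_cons_of_ne_nil hne
  have hn0 : n0 ∈ nums := by rw [hn]; exact List.mem_cons_self ..
  have hmemS : ∀ z : Int, z ∈ PySem.Set.ofList nums ↔ z ∈ nums := fun z => PySem.Set.mem_ofList nums z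
  have hitems : (PySem.Dict.counter nums).items
      = (PySem.Set.ofList nums).map (fun k => (k, (nums.count k : Int))) :=
    PySem.Dict.items_counter nums
  have hsize : (PySem.Dict.counter nums).size = (PySem.Set.ofList nums).length := by
    rw [PySem.Dict.size, hitems, List.length_map]
  by_cases h1 : (PySem.Set.ofList nums).length = 1
  · obtain ⟨k0, hk0⟩ := List.length_eq_one_iff.mp h1
    have hall : ∀ z ∈ nums, z = k0 := by
      intro z hz
      have := (hmemS z).mpr hz
      rw [hk0] at this
      simpa using this
    have hcnt : nums.count k0 = nums.length := List.count_eq_length.mpr (fun b hb => (hall b hb).symm)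
    have hgood : pvGood nums :=
      Or.inl ⟨(nums.length : Int), by exact_mod_cast h2, fun z hz => by rw [hall z hz, hcnt]⟩
    have hT : solve nums = true := by
      simp only [solve]
      rw [if_neg hlt]
      simp [hsize, h1]
    exact iff_of_true hT hgood
  · have hSne : PySem.Set.ofList nums ≠ [] := by
      intro h0
      have := (hmemS n0).mpr hn0
      rw [h0] at this
      simp at this
    obtain ⟨k0, Stl, hSc⟩ := List.exists_cons_of_ne_nil hSne
    have hk0mem : k0 ∈ nums := (hmemS k0).mp (by rw [hSc]; exact List.mem_cons_self ..)
    have hitems' : (PySem.Dict.counter nums).items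
        = (k0, (nums.count k0 : Int)) :: Stl.map (fun k => (k, (nums.count k : Int))) := by
      rw [hitems, hSc, List.map_cons]
    have hred : solve nums =
        (if decide (∀ p ∈ Stl.map (fun k => (k, (nums.count k : Int))), p.2 = (nums.count k0 : Int))
            && decide (2 ≤ (nums.count k0 : Int)) then true
         else pvEvenLoop ((k0, (nums.count k0 : Int)) :: Stl.map (fun k => (k, (nums.count k : Int))))) := by
      simp only [solve]
      rw [if_neg hlt]
      rw [show ((PySem.Dict.counter nums).size == 1) = false from by
        rw [hsize]; simpa using h1]
      simp only [Bool.false_eq_true, if_false, hitems']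
      rw [show pvSameLoop ((k0, (nums.count k0 : Int)) :: Stl.map (fun k => (k, (nums.count k : Int)))) none
            = pvSameLoop (Stl.map (fun k => (k, (nums.count k : Int)))) (some (nums.count k0 : Int)) from by
        simp [pvSameLoop]]
      rw [pvSameLoop_some]
      simp
    rw [hred]
    unfold pvGood
    have hfirst : (∃ k : Int, 2 ≤ k ∧ ∀ z ∈ nums, ((nums.count z : Int)) = k) ↔
        ((∀ p ∈ Stl.map (fun k => (k, (nums.count k : Int))), p.2 = (nums.count k0 : Int))
          ∧ 2 ≤ (nums.count k0 : Int)) := by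
      constructor
      · rintro ⟨k, hk2, hkall⟩
        have hck0 : ((nums.count k0 : Int)) = k := hkall k0 hk0mem
        constructor
        · rintro p hp
          rcases List.mem_map.mp hp with ⟨z, hz, rfl⟩
          have hzmem : z ∈ nums := (hmemS z).mp (by rw [hSc]; exact List.mem_cons_of_mem _ hz)
          rw [hkall z hzmem, hck0]
        · omega
      · rintro ⟨hall, hk2⟩
        refine ⟨(nums.count k0 : Int), hk2, ?_⟩
        intro z hz
        have hzS := (hmemS z).mpr hz
        rw [hSc] at hzS
        rcases List.mem_cons.mp hzS with rfl | hzS'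
        · rfl
        · exact hall ((z, (nums.count z : Int))) (List.mem_map.mpr ⟨z, hzS', rfl⟩)
    have heven : pvEvenLoop ((k0, (nums.count k0 : Int)) :: Stl.map (fun k => (k, (nums.count k : Int)))) = true ↔
        (∀ z ∈ nums, 2 ≤ ((nums.count z : Int)) ∧ PySem.Int.mod (nums.count z) 2 = 0) := by
      rw [← hitems', pvEvenLoop_iff]
      constructor
      · intro h z hz
        have hzS := (hmemS z).mpr hz
        have hp : ((z, (nums.count z : Int))) ∈ (PySem.Dict.counter nums).items := by
          rw [hitems]
          exact List.mem_map.mpr ⟨z, hzS, rfl⟩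
        have := h _ hp
        exact ⟨this.1, (pvMod2 _).mp this.2⟩
      · intro h p hp
        rw [hitems] at hp
        rcases List.mem_map.mp hp with ⟨z, hzS, rfl⟩
        have hz : z ∈ nums := (hmemS z).mp hzS
        exact ⟨(h z hz).1, (pvMod2 _).mpr (h z hz).2⟩
    by_cases hP : (∀ p ∈ Stl.map (fun k => (k, (nums.count k : Int))), p.2 = (nums.count k0 : Int))
        ∧ 2 ≤ (nums.count k0 : Int)
    · rw [if_pos (by rw [Bool.and_eq_true, decide_eq_true_eq, decide_eq_true_eq]; exact hP)]
      exact iff_of_true rfl (Or.inl (hfirst.mpr hP))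
    · have hcond : (decide (∀ p ∈ Stl.map (fun k => (k, (nums.count k : Int))), p.2 = (nums.count k0 : Int))
          && decide (2 ≤ (nums.count k0 : Int))) = false := by
        rcases Classical.not_and_iff_not_or_not.mp hP with h' | h'
        · rw [decide_eq_false h', Bool.false_and]
        · rw [decide_eq_false h', Bool.and_false]
      rw [hcond]
      simp only [Bool.false_eq_true, if_false]
      rw [heven]
      constructor
      · intro h; exact Or.inr h
      · rintro (hf | hs)
        · exact absurd (hfirst.mp hf) hP
        · exact hs

theorem solve_alt_iff (nums : List Int) (h2 : 2 ≤ nums.length) :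
    solve_alt nums = true ↔ pvGood nums := by
  have hlt : ¬ nums.length < 2 := by omega
  have hne : nums ≠ [] := by intro h0; rw [h0] at h2; simp at h2
  obtain ⟨n0, ntl, hn⟩ := List.exists_cons_of_ne_nil hne
  have hperm : (PySem.List.sorted nums (fun v => v) false).Perm nums := PySem.List.sorted_perm nums (fun v => v) false
  have hpl : (PySem.List.sorted nums (fun v => v) false).Pairwise (· ≤ ·) := by
    simpa using PySem.List.sorted_pairwise (xs := nums) (key := fun v => v)
  have hlne : PySem.List.sorted nums (fun v => v) false ≠ [] := by
    intro h0
    have := hperm.length_eq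
    rw [h0] at this
    simp at this
    omega
  obtain ⟨x, xs, hcons⟩ := List.exists_cons_of_ne_nil hlne
  rw [hcons] at hperm hpl
  have hmemc : ∀ r : Int, r ∈ pvRuns xs x 1 ↔ ∃ z ∈ nums, ((nums.count z : Int)) = r := by
    intro r
    rw [pvRuns_mem' xs x r hpl]
    constructor
    · rintro ⟨z, hz, hzc⟩
      refine ⟨z, hperm.mem_iff.mp hz, ?_⟩
      rw [← hperm.count_eq z]
      exact hzc
    · rintro ⟨z, hz, hzc⟩
      refine ⟨z, hperm.mem_iff.mpr hz, ?_⟩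
      rw [hperm.count_eq z]
      exact hzc
  obtain ⟨c, cs, hruns⟩ : ∃ c cs, pvRuns xs x 1 = c :: cs := by
    cases hr : pvRuns xs x 1 with
    | nil => exact absurd hr (pvRuns_ne_nil xs x 1)
    | cons c cs => exact ⟨c, cs, rfl⟩
  rw [hruns] at hmemc
  have hred : solve_alt nums =
      (if PySem.List.min? (c :: cs) (fun v => v) == PySem.List.max? (c :: cs) (fun v => v)
       then decide (2 ≤ c)
       else (c :: cs).all (fun v => decide (2 ≤ v) && (PySem.Int.mod v 2 == 0))) := by
    rw [solve_alt, if_neg hlt, hcons]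
    simp only [hruns]
  rw [hred]
  unfold pvGood
  rw [PySem.List.min?_id_cons, PySem.List.max?_id_cons]
  have hmin_le := PySem.List.foldl_min_le cs c
  have hmax_ge := PySem.List.le_foldl_max cs c
  have hminmem := PySem.List.foldl_min_mem cs c
  have hmaxmem := PySem.List.foldl_max_mem cs c
  have hcount_mem : ∀ z ∈ nums, ((nums.count z : Int)) ∈ c :: cs :=
    fun z hz => (hmemc _).mpr ⟨z, hz, rfl⟩
  by_cases heq : cs.foldl min c = cs.foldl max c
  · have hallm : ∀ r ∈ c :: cs, r = c := by
      intro r hr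
      rcases List.mem_cons.mp hr with rfl | hr'
      · rfl
      · have h1 := hmin_le.2 r hr'
        have h2 := hmax_ge.2 r hr'
        have h3 := hmin_le.1
        have h4 := hmax_ge.1
        omega
    rw [if_pos (by simp [heq])]
    by_cases hc : 2 ≤ c
    · rw [decide_eq_true_eq]
      exact iff_of_true hc (Or.inl ⟨c, hc, fun z hz => hallm _ (hcount_mem z hz)⟩)
    · rw [decide_eq_true_eq]
      apply iff_of_false hc
      have hn0 : n0 ∈ nums := by rw [hn]; exact List.mem_cons_self ..
      have hc0 : ((nums.count n0 : Int)) = c := hallm _ (hcount_mem n0 hn0)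
      rintro (⟨k, hk2, hkall⟩ | hs)
      · have := hkall n0 hn0
        omega
      · have := (hs n0 hn0).1
        omega
  · rw [if_neg (by simp [heq])]
    have hnotfirst : ¬ ∃ k : Int, 2 ≤ k ∧ ∀ z ∈ nums, ((nums.count z : Int)) = k := by
      rintro ⟨k, hk2, hkall⟩
      have hall : ∀ r ∈ c :: cs, r = k := by
        intro r hr
        rcases (hmemc r).mp hr with ⟨z, hz, hzc⟩
        rw [← hzc]
        exact hkall z hz
      apply heq
      have hm : cs.foldl min c = k := by
        rcases hminmem with h' | h'
        · rw [h']; exact hall c (List.mem_cons_self ..)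
        · exact hall _ (List.mem_cons_of_mem _ h')
      have hM : cs.foldl max c = k := by
        rcases hmaxmem with h' | h'
        · rw [h']; exact hall c (List.mem_cons_self ..)
        · exact hall _ (List.mem_cons_of_mem _ h')
      rw [hm, hM]
    have hall_iff : (c :: cs).all (fun v => decide (2 ≤ v) && (PySem.Int.mod v 2 == 0)) = true ↔
        (∀ z ∈ nums, 2 ≤ ((nums.count z : Int)) ∧ PySem.Int.mod (nums.count z) 2 = 0) := by
      rw [List.all_eq_true]
      constructor
      · intro h z hz
        have hm := h _ (hcount_mem z hz)
        simp only [Bool.and_eq_true, decide_eq_true_eq, beq_iff_eq] at hm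
        exact hm
      · intro h r hr
        rcases (hmemc r).mp hr with ⟨z, hz, hzc⟩
        rw [← hzc]
        simp only [Bool.and_eq_true, decide_eq_true_eq, beq_iff_eq]
        exact h z hz
    rw [hall_iff]
    constructor
    · intro h; exact Or.inr h
    · rintro (hf | hs)
      · exact absurd hf hnotfirst
      · exact hs

-- ===== VERDICT (by name: the statement is the Claim_ definition above) =====
theorem solve_spec : Claim_equal_solve := by
  intro nums _
  unfold Spec_solve
  by_cases h : nums.length < 2
  · simp [solve, solve_alt, h]
  · have h2 : 2 ≤ nums.length := by omega
    have := (solve_iff nums h2).trans (solve_alt_iff nums h2).symm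
    cases ha : solve nums <;> cases hb : solve_alt nums <;> simp_all
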